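-- pv_equiv track=rewrite | github.com/ranbogmord/aoc2018 | day2/first.py | count_occurances
-- ===== SOURCE A (Python) =====
-- def count_letters(letters):
--     letters = list(letters)
--     found = {}
--     for letter in letters:
--         if letter not in found:
--             found[letter] = 0
--         found[letter] += 1
--
--     return found
--
-- def count_occurances(word):
--     found = count_letters(word)
--     doubles = False
--     tripples = False
--
--     for letter, count in found.items():
--         if count == 2:
--             doubles = True
--         if count == 3:
--             tripples = True
--
--     return doubles, tripples
-- ===== SOURCE B (Python) =====
-- def count_occurances(word):
--     chars = sorted(word)
--     doubles = False
--     tripples = False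
--     cur = None
--     run = 0
--     for c in chars:
--         if c == cur:
--             run += 1
--         else:
--             if run == 2:
--                 doubles = True
--             if run == 3:
--                 tripples = True
--             cur = c
--             run = 1
--     if run == 2:
--         doubles = True
--     if run == 3:
--         tripples = True
--     return doubles, tripples
-- ===== Notes on version B (the rewrite author's own statement) =====
-- stated objective: alternative
-- what changed: Replaces hash-map counting plus a dict-items flag scan by sorting the letters and doing one run-length grouping pass over the sorted list, flushing each completed run (and the final run) to set the 2/3 flags.
import Mathlib
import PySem

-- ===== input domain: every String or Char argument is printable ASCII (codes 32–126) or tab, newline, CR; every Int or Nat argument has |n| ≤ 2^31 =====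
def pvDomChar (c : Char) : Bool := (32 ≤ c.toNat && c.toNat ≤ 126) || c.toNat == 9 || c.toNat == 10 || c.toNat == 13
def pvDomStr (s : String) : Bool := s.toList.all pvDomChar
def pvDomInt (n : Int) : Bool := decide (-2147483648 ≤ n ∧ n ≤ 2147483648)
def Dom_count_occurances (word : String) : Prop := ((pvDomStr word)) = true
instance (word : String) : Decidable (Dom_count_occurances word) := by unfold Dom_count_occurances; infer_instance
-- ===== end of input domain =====

-- B replaces A's dict counting + items flag scan by sorting the letters and one run-length grouping pass (alternative algorithm, same results).

-- ===== PORT A =====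
def count_letters (letters : String) : PySem.Dict Char Int :=
  letters.toList.foldl
    (fun found letter =>
      let found := if found.contains letter then found else found.insert letter 0
      found.insert letter (found.getD letter 0 + 1))
    PySem.Dict.empty

def count_occurances (word : String) : Bool × Bool :=
  let found := count_letters word
  found.items.foldl
    (fun (st : Bool × Bool) kv =>
      let doubles := if kv.2 == (2 : Int) then true else st.1
      let tripples := if kv.2 == (3 : Int) then true else st.2
      (doubles, tripples))
    (false, false)

-- ===== PORT B =====
-- the body of B's for-loop: state (cur, run, doubles, tripples)
def altStep (st : Option Char × Int × Bool × Bool) (c : Char) : Option Char × Int × Bool × Bool :=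
  let (cur, run, doubles, tripples) := st
  if some c == cur then (cur, run + 1, doubles, tripples)
  else (some c, 1,
        if run == (2 : Int) then true else doubles,
        if run == (3 : Int) then true else tripples)

def count_occurances_alt (word : String) : Bool × Bool :=
  let chars := PySem.List.sorted word.toList (fun c => c) false
  let st := chars.foldl altStep (none, 0, false, false)
  (if st.2.1 == (2 : Int) then true else st.2.2.1,
   if st.2.1 == (3 : Int) then true else st.2.2.2)

-- ===== PRECONDITION & SPEC =====
def Spec_count_occurances (word : String) (out : Bool × Bool) : Prop := out = count_occurances_alt word
instance (word : String) (out : Bool × Bool) : Decidable (Spec_count_occurances word out) := by unfold Spec_count_occurances; infer_instance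

-- ===== CLAIM (what is proved, stated in full; the proofs are below) =====
def Claim_equal_count_occurances : Prop := ∀ (word : String), Dom_count_occurances word → Spec_count_occurances word (count_occurances word)

-- ===== LEMMAS AND PROOFS =====

-- "some character of l occurs exactly k times in l"
def hasCnt (k : Int) (l : List Char) : Bool := l.any (fun c => (l.count c : Int) == k)

lemma hasCnt_nil (k : Int) : hasCnt k [] = false := rfl

lemma hasCnt_cons (k : Int) (x : Char) (xs : List Char) :
    hasCnt k (x :: xs) =
      ((((1 : Int) + xs.count x) == k) || hasCnt k (xs.filter (· ≠ x))) := by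
  have hne : ∀ c, c ≠ x → (x :: xs).count c = xs.count c ∧
      (xs.filter (· ≠ x)).count c = xs.count c := by
    intro c hc
    refine ⟨by simp [Ne.symm hc], ?_⟩
    rw [List.count_filter]
    simp [hc]
  have hx' : (((x :: xs).count x : Int)) = 1 + xs.count x := by
    simp
    ring
  rw [Bool.eq_iff_iff]
  simp only [hasCnt, List.any_eq_true, Bool.or_eq_true, beq_iff_eq, List.mem_cons,
    List.mem_filter, decide_eq_true_eq]
  constructor
  · rintro ⟨c, hc | hc, hcount⟩
    · subst hc
      rw [hx'] at hcount
      exact Or.inl hcount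
    · by_cases hcx : c = x
      · subst hcx
        rw [hx'] at hcount
        exact Or.inl hcount
      · right
        refine ⟨c, ⟨hc, hcx⟩, ?_⟩
        rw [(hne c hcx).1] at hcount
        rw [(hne c hcx).2]
        exact hcount
  · rintro (h | ⟨c, ⟨hc, hcx⟩, hcount⟩)
    · exact ⟨x, Or.inl rfl, by rw [hx']; exact h⟩
    · refine ⟨c, Or.inr hc, ?_⟩
      rw [(hne c hcx).2] at hcount
      rw [(hne c hcx).1]
      exact hcount

-- the flush after the loop
def finalize (st : Option Char × Int × Bool × Bool) : Bool × Bool :=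
  (if st.2.1 == (2 : Int) then true else st.2.2.1,
   if st.2.1 == (3 : Int) then true else st.2.2.2)

lemma if_eq_or (b d : Bool) : (if b then true else d) = (d || b) := by
  cases b <;> cases d <;> rfl

-- invariant of B's loop on a sorted remainder: the current run of `c` extends by
-- the `c`s still ahead, and everything else contributes its own runs = its counts
lemma go_spec (xs : List Char) (c : Char) (run : Int) (d t : Bool)
    (hle : ∀ y ∈ xs, c ≤ y) (hp : xs.Pairwise (· ≤ ·)) :
    finalize (xs.foldl altStep (some c, run, d, t)) =
      (d || ((run + xs.count c) == (2 : Int)) || hasCnt 2 (xs.filter (· ≠ c)),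
       t || ((run + xs.count c) == (3 : Int)) || hasCnt 3 (xs.filter (· ≠ c))) := by
  induction xs generalizing c run d t with
  | nil =>
      simp only [List.foldl_nil, finalize, hasCnt_nil, List.count_nil, Nat.cast_zero,
        add_zero, List.filter_nil, Bool.or_false]
      rw [Prod.mk.injEq]
      exact ⟨if_eq_or _ _, if_eq_or _ _⟩
  | cons x xs ih =>
      rcases List.pairwise_cons.mp hp with ⟨hx, hp'⟩
      by_cases hxc : x = c
      · subst hxc
        have step : altStep (some x, run, d, t) x = (some x, run + 1, d, t) := by
          simp [altStep]
        rw [List.foldl_cons, step,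
          ih x (run + 1) d t (fun y hy => hle y (List.mem_cons_of_mem _ hy)) hp']
        have h2 : ∀ k : Int, ((run + 1 + (xs.count x : Int)) == k)
            = ((run + ((x :: xs).count x : Int)) == k) := by
          intro k
          have : run + 1 + (xs.count x : Int) = run + ((x :: xs).count x : Int) := by
            simp; ring
          rw [this]
        have hf : (x :: xs).filter (· ≠ x) = xs.filter (· ≠ x) := by simp
        rw [h2 2, h2 3, hf]
      · have hcx : c < x := lt_of_le_of_ne (hle x (List.mem_cons_self)) (Ne.symm hxc)
        have step : altStep (some c, run, d, t) x =
            (some x, 1, if run == (2 : Int) then true else d,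
                        if run == (3 : Int) then true else t) := by
          simp [altStep, hxc]
        have hnc : ∀ y ∈ x :: xs, y ≠ c := by
          intro y hy
          rcases List.mem_cons.mp hy with h | h
          · subst h; exact fun h' => absurd h' hxc
          · exact fun h' => absurd (h' ▸ hx y h) (not_le.mpr hcx)
        have hcount : ((x :: xs).count c) = 0 := by
          rw [List.count_eq_zero]
          intro hmem; exact hnc c hmem rfl
        have hfilter : (x :: xs).filter (· ≠ c) = x :: xs := by
          rw [List.filter_eq_self]
          intro y hy; simpa using hnc y hy
        rw [List.foldl_cons, step, ih x 1 _ _ hx hp', hcount, hfilter, hasCnt_cons,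
          hasCnt_cons, if_eq_or, if_eq_or]
        simp [Bool.or_assoc]

lemma alt_eq_hasCnt (word : String) :
    count_occurances_alt word =
      (hasCnt 2 word.toList, hasCnt 3 word.toList) := by
  unfold count_occurances_alt
  have hperm : (PySem.List.sorted word.toList (fun c => c) false).Perm word.toList :=
    PySem.List.sorted_perm _ _ _
  have hhc : ∀ k : Int, hasCnt k (PySem.List.sorted word.toList (fun c => c) false)
      = hasCnt k word.toList := by
    intro k
    rw [Bool.eq_iff_iff]
    simp only [hasCnt, List.any_eq_true, beq_iff_eq]
    constructor
    · rintro ⟨c, hc, h⟩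
      exact ⟨c, hperm.mem_iff.mp hc, by rw [← hperm.count_eq]; exact h⟩
    · rintro ⟨c, hc, h⟩
      exact ⟨c, hperm.mem_iff.mpr hc, by rw [hperm.count_eq]; exact h⟩
  rw [← hhc 2, ← hhc 3]
  have hp : (PySem.List.sorted word.toList (fun c => c) false).Pairwise (· ≤ ·) := by
    have := PySem.List.sorted_pairwise (xs := word.toList) (key := fun c => c)
    simpa using this
  cases hs : PySem.List.sorted word.toList (fun c => c) false with
  | nil => simp [finalize, hasCnt_nil]
  | cons x xs =>
      rw [hs] at hp
      rcases List.pairwise_cons.mp hp with ⟨hx, hp'⟩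
      have step0 : altStep (none, 0, false, false) x = (some x, 1, false, false) := by
        simp [altStep]
      have := go_spec xs x 1 false false hx hp'
      simp only [finalize] at this
      simp only [List.foldl_cons, step0, this, Bool.false_or, hasCnt_cons]

-- A-side: the flag-setting fold over (key,count) pairs is an `any`.
lemma flag_fold (l : List (Char × Int)) (a b : Bool) :
    l.foldl
      (fun (st : Bool × Bool) kv =>
        let doubles := if kv.2 == (2 : Int) then true else st.1
        let tripples := if kv.2 == (3 : Int) then true else st.2
        (doubles, tripples)) (a, b)
    = (a || l.any (fun kv => kv.2 == (2 : Int)), b || l.any (fun kv => kv.2 == (3 : Int))) := by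
  induction l generalizing a b with
  | nil => simp
  | cons x xs ih =>
      simp only [List.foldl_cons, List.any_cons, ih]
      cases e2 : (x.2 == (2 : Int)) <;> cases e3 : (x.2 == (3 : Int)) <;>
        simp [Bool.or_comm]

-- A's guarded "insert 0 then += 1" step is the plain counting step.
lemma count_letters_step (d : PySem.Dict Char Int) (c : Char) :
    (let d' := if d.contains c then d else d.insert c 0
     d'.insert c (d'.getD c 0 + 1)) = d.insert c (d.getD c 0 + 1) := by
  by_cases h : d.contains c = true
  · simp [h]
  · simp only [Bool.not_eq_true] at h
    have hn : d.get? c = none := (PySem.Dict.get?_eq_none_iff_contains d c).mpr h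
    simp [h, PySem.Dict.insert_insert_self, PySem.Dict.getD, hn]

lemma count_letters_eq_counter (w : String) :
    count_letters w = PySem.Dict.counter w.toList := by
  unfold count_letters
  rw [← PySem.Dict.foldl_insert_getD_add_one_eq_counter]
  exact PySem.List.foldl_congr_mem _ _ _ _ (fun d c _ => count_letters_step d c)

lemma a_eq_hasCnt (word : String) :
    count_occurances word = (hasCnt 2 word.toList, hasCnt 3 word.toList) := by
  unfold count_occurances
  rw [count_letters_eq_counter]
  simp only [PySem.Dict.items_counter, flag_fold, Bool.false_or]
  rw [Prod.mk.injEq]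
  constructor <;>
  · rw [Bool.eq_iff_iff]
    simp only [hasCnt, List.any_map, List.any_eq_true, Function.comp, beq_iff_eq,
      PySem.Set.mem_ofList]

-- ===== VERDICT (by name: the statement is the Claim_ definition above) =====
theorem count_occurances_spec : Claim_equal_count_occurances := by
  intro word _
  show count_occurances word = count_occurances_alt word
  rw [a_eq_hasCnt, alt_eq_hasCnt]
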